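-- pv_equiv track=rewrite | github.com/lcbb/ssDNA-memory | dnaMemFuncs.py | NTintFill
-- ===== SOURCE A (Python) =====
-- def Int2DNA(numB):
-- 	convert = {'0': 'T', '1': 'G', '2': 'A', '3': 'C'}
-- 	newNum=''
-- 	current=numB
-- 	A=''
-- 	while int(current)!=0:
-- 		newNum=str(int(current%4))+newNum
-- 		current=int(current/4)
-- 	for i in newNum:
-- 		A=A+convert[i]
-- 	return(A);
--
-- def NTintFill(numB, fillNum):
-- 	A=Int2DNA(numB)
-- 	B=''
-- 	for i in range(fillNum-len(A)):
-- 		B=B+'T'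
-- 	for i in A:
-- 		B=B+i
-- 	return(B);
-- ===== SOURCE B (Python) =====
-- def NTintFill(numB, fillNum):
--     def enc(n):
--         return enc(n // 4) + 'TGAC'[n % 4] if n else ''
--     return enc(numB).rjust(fillNum, 'T')
-- ===== Notes on version B (the rewrite author's own statement) =====
-- stated objective: simpler
-- what changed: A one-line recursive encoder emits nucleotides directly ('TGAC'[n % 4]) most-significant-first and rjust pads, replacing A's iterative decimal-digit-string build, dict-translation loop, 'T'-padding loop and copy loop; Pre_ excludes negative numB, where A's digit sequence is an accident of int(current/4) truncation and B's natural floor-division recursion raises RecursionError. Mechanism: A's B=B+'T'/B=B+i concatenations are quadratic; B builds each piece once (rjust + direct indexing).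
-- outside the precondition, e.g. on NTintFill(-5, 3): A returns 'TCC', B raises RecursionError
import Mathlib
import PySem

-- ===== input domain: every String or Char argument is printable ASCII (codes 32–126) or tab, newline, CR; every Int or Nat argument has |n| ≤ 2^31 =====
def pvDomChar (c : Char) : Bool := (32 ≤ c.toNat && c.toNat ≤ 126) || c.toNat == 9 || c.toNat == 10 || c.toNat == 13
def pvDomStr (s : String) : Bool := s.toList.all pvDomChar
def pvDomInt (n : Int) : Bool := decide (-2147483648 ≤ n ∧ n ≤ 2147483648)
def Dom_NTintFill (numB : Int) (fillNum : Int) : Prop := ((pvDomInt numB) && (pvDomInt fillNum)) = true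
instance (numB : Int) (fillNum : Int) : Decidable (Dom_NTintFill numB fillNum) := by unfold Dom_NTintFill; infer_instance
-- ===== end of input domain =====

-- B: a recursive encoder emitting nucleotides directly plus rjust padding,
-- replacing A's four staged loops; objective: simpler.

-- ===== PORT A =====
-- termination helper for A's while-loop (cited by decreasing_by)
theorem pvTdivAbsLt (n : Int) (h : n ≠ 0) : (n.tdiv 4).natAbs < n.natAbs := by
  rw [Int.natAbs_tdiv]
  exact Nat.div_lt_self (by omega) (by norm_num)

-- Python dict {'0':'T','1':'G','2':'A','3':'C'}; the loop only ever looks up the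
-- digits '0'..'3' it produced, so KeyError is unreachable
def pvConvert (c : Char) : Char :=
  if c = '0' then 'T' else if c = '1' then 'G'
  else if c = '2' then 'A' else if c = '3' then 'C' else c

-- while int(current)!=0: newNum=str(int(current%4))+newNum; current=int(current/4)
-- int(current/4) is truncation toward zero = Int.tdiv (exact on Dom: |n| ≤ 2^31 < 2^53)
def pvInt2DNALoop (current : Int) (newNum : List Char) : List Char :=
  if _h : current = 0 then newNum
  else pvInt2DNALoop (current.tdiv 4)
        ((PySem.Int.toStr (PySem.Int.mod current 4)).toList ++ newNum)
termination_by current.natAbs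
decreasing_by exact pvTdivAbsLt current _h

def Int2DNA (numB : Int) : String :=
  let newNum := pvInt2DNALoop numB []
  -- for i in newNum: A = A + convert[i]
  String.ofList (newNum.foldl (fun A c => A ++ [pvConvert c]) [])

def NTintFill (numB : Int) (fillNum : Int) : String :=
  let A := (Int2DNA numB).toList
  -- for i in range(fillNum-len(A)): B = B + 'T'
  let B := (PySem.List.pyRange 0 (fillNum - A.length) 1).foldl (fun B _ => B ++ ['T']) []
  -- for i in A: B = B + i
  String.ofList (A.foldl (fun B c => B ++ [c]) B)

-- ===== PORT B =====
-- def enc(n): return enc(n // 4) + 'TGAC'[n % 4] if n else ''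
-- (the 0 < n guard only makes the recursion total: on n < 0 Python's enc never
-- reaches 0 and raises RecursionError — exactly the inputs Pre_ excludes)
def pvEnc (n : Int) : List Char :=
  if _h : 0 < n then
    pvEnc (PySem.Int.floordiv n 4) ++ [(PySem.Str.pyGet? "TGAC" (PySem.Int.mod n 4)).getD 'T']
  else []
termination_by n.toNat
decreasing_by
  rw [PySem.Int.floordiv_eq_ediv_of_pos (by norm_num : (0:Int) < 4)]
  omega

-- return enc(numB).rjust(fillNum, 'T')
def NTintFill_alt (numB : Int) (fillNum : Int) : String :=
  let s := pvEnc numB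
  String.ofList (List.replicate (fillNum - s.length).toNat 'T' ++ s)

-- ===== PRECONDITION & SPEC =====
-- Pre_ excludes negative numB, on which A's digit sequence is an accident of
-- int(current/4) truncation while B's floor-division recursion raises RecursionError.
def Pre_NTintFill (numB : Int) (fillNum : Int) : Prop := 0 ≤ numB
instance (numB : Int) (fillNum : Int) : Decidable (Pre_NTintFill numB fillNum) := by unfold Pre_NTintFill; infer_instance

def pvWitness_NTintFill : Int × Int := (5, 3)

def Spec_NTintFill (numB : Int) (fillNum : Int) (out : String) : Prop := out = NTintFill_alt numB fillNum
instance (numB : Int) (fillNum : Int) (out : String) : Decidable (Spec_NTintFill numB fillNum out) := by unfold Spec_NTintFill; infer_instance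

-- ===== CLAIM (what is proved, stated in full; the proofs are below) =====
def Claim_equal_NTintFill : Prop := ∀ (numB : Int) (fillNum : Int), Dom_NTintFill numB fillNum → Pre_NTintFill numB fillNum → Spec_NTintFill numB fillNum (NTintFill numB fillNum)

-- ===== LEMMAS AND PROOFS =====

-- the digit char produced by one A-step, converted, is the nucleotide B picks directly
theorem pvDigit_eq (n : Int) :
    (PySem.Int.toStr (PySem.Int.mod n 4)).toList.map pvConvert
      = [(PySem.Str.pyGet? "TGAC" (PySem.Int.mod n 4)).getD 'T'] := by
  have h : 0 ≤ PySem.Int.mod n 4 ∧ PySem.Int.mod n 4 < 4 := by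
    simp [PySem.Int.mod, Int.fmod_eq_emod]; omega
  set d := PySem.Int.mod n 4 with hd
  obtain ⟨h0, h4⟩ := h
  interval_cases d <;> decide

-- A's loop prepends its digits to the accumulator
theorem pvLoop_acc (k : Nat) : ∀ (n : Int), n.natAbs ≤ k → ∀ (acc : List Char),
    pvInt2DNALoop n acc = pvInt2DNALoop n [] ++ acc := by
  induction k with
  | zero =>
    intro n hn acc
    have h0 : n = 0 := by omega
    subst h0; simp [pvInt2DNALoop]
  | succ k ih =>
    intro n hn acc
    by_cases h : n = 0
    · subst h; simp [pvInt2DNALoop]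
    · have hlt : (n.tdiv 4).natAbs ≤ k := by have := pvTdivAbsLt n h; omega
      conv_lhs => rw [pvInt2DNALoop]
      conv_rhs => rw [pvInt2DNALoop]
      simp only [h, dite_false]
      rw [ih _ hlt, ih _ hlt ((PySem.Int.toStr (PySem.Int.mod n 4)).toList ++ [])]
      simp

-- for 0 ≤ n, A's digit string mapped through the dict is exactly B's recursive encoding
theorem pvLoop_eq_enc (k : Nat) : ∀ (n : Int), 0 ≤ n → n.toNat ≤ k →
    (pvInt2DNALoop n []).map pvConvert = pvEnc n := by
  induction k with
  | zero =>
    intro n h0 hn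
    have : n = 0 := by omega
    subst this; rw [pvInt2DNALoop, pvEnc.eq_def]; simp
  | succ k ih =>
    intro n h0 hn
    by_cases h : n = 0
    · subst h; rw [pvInt2DNALoop, pvEnc.eq_def]; simp
    · have hpos : 0 < n := by omega
      have hdiv : n.tdiv 4 = PySem.Int.floordiv n 4 := by
        rw [Int.tdiv_eq_ediv_of_nonneg h0, PySem.Int.floordiv_eq_ediv_of_pos (by norm_num)]
      have hrec0 : 0 ≤ PySem.Int.floordiv n 4 := by
        rw [PySem.Int.floordiv_eq_ediv_of_pos (by norm_num)]
        exact Int.ediv_nonneg h0 (by norm_num)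
      have hreck : (PySem.Int.floordiv n 4).toNat ≤ k := by
        rw [PySem.Int.floordiv_eq_ediv_of_pos (by norm_num)]
        omega
      conv_lhs => rw [pvInt2DNALoop]
      simp only [h, dite_false]
      rw [pvLoop_acc (n.tdiv 4).natAbs _ le_rfl, List.map_append, List.append_nil,
          hdiv, ih _ hrec0 hreck, pvDigit_eq n]
      conv_rhs => rw [pvEnc.eq_def]
      simp [hpos]

-- A's convert-fold is map
theorem pvFoldConv (l : List Char) (init : List Char) :
    l.foldl (fun A c => A ++ [pvConvert c]) init = init ++ l.map pvConvert := by
  induction l generalizing init with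
  | nil => simp
  | cons c t ih => simp [List.foldl, ih]

-- A's pad loop appends one 'T' per range element
theorem pvFoldPad (l : List Int) (init : List Char) :
    l.foldl (fun B _ => B ++ ['T']) init = init ++ List.replicate l.length 'T' := by
  induction l generalizing init with
  | nil => simp
  | cons c t ih =>
    simp only [List.foldl_cons, List.length_cons]
    rw [ih, List.append_assoc]
    simp [List.replicate_succ]

-- A's copy loop is append
theorem pvFoldCopy (l : List Char) (init : List Char) :
    l.foldl (fun B c => B ++ [c]) init = init ++ l := by
  induction l generalizing init with
  | nil => simp
  | cons c t ih => simp [List.foldl, ih]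

-- ===== VERDICT (by name: the statement is the Claim_ definition above) =====
theorem NTintFill_spec : Claim_equal_NTintFill := by
  intro numB fillNum _ hpre
  unfold Spec_NTintFill NTintFill NTintFill_alt Int2DNA
  simp only [pvFoldConv, pvFoldPad, pvFoldCopy, List.nil_append,
    PySem.List.length_pyRange_one, String.toList_ofList,
    pvLoop_eq_enc numB.toNat numB hpre le_rfl, sub_zero]
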